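-- pv_equiv track=rewrite | github.com/gsitechorg/open-belex | src/open_belex/compiler.py | group_by_reg_categories
-- ===== SOURCE A (Python) =====
-- from typing import (Any, Callable, Dict, NamedTuple, Sequence, Set, TypeVar,
--                     Union)
--
-- def is_local_var_nym(nym: str) -> bool:
--     return nym.startswith("_INTERNAL")
--
-- def is_tmp_var_nym(nym: str) -> bool:
--     return nym.startswith("t_")
--
-- def is_var_nym(nym: str) -> bool:
--     return is_local_var_nym(nym) or is_tmp_var_nym(nym)
--
-- def is_param_nym(nym: str) -> bool:
--     return not is_var_nym(nym)
--
-- def group_by_reg_categories(unsorted_register_map: Dict[str, int]) -> Sequence[str]: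
--     IRs = []
--     params = []
--     local_vars = []
--     tmp_vars = []
--     for nym in unsorted_register_map:
--         if nym == "IR":
--             IRs.append(nym)
--         elif is_param_nym(nym):
--             params.append(nym)
--         elif is_local_var_nym(nym):
--             local_vars.append(nym)
--         elif is_tmp_var_nym(nym):
--             tmp_vars.append(nym)
--         else:
--             raise ValueError(f"Unsupported nym type: {nym}")
--     return IRs, params, local_vars, tmp_vars
-- ===== SOURCE B (Python) =====
-- def is_local_var_nym(nym: str) -> bool:
--     return nym.startswith("_INTERNAL")
--
-- def is_tmp_var_nym(nym: str) -> bool: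
--     return nym.startswith("t_")
--
-- def is_var_nym(nym: str) -> bool:
--     return is_local_var_nym(nym) or is_tmp_var_nym(nym)
--
-- def is_param_nym(nym: str) -> bool:
--     return not is_var_nym(nym)
--
-- def group_by_reg_categories(unsorted_register_map):
--     nyms = list(unsorted_register_map)
--     IRs = [n for n in nyms if n == "IR"]
--     params = [n for n in nyms if n != "IR" and is_param_nym(n)]
--     local_vars = [n for n in nyms if n != "IR" and is_local_var_nym(n)]
--     tmp_vars = [n for n in nyms
--                 if n != "IR" and is_tmp_var_nym(n) and not is_local_var_nym(n)]
--     return IRs, params, local_vars, tmp_vars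
-- ===== Notes on version B (the rewrite author's own statement) =====
-- stated objective: simpler
-- what changed: Replaces the single four-way branching loop with four independent filter passes (one comprehension per bucket) whose predicates encode the original branch precedence.
import Mathlib
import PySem

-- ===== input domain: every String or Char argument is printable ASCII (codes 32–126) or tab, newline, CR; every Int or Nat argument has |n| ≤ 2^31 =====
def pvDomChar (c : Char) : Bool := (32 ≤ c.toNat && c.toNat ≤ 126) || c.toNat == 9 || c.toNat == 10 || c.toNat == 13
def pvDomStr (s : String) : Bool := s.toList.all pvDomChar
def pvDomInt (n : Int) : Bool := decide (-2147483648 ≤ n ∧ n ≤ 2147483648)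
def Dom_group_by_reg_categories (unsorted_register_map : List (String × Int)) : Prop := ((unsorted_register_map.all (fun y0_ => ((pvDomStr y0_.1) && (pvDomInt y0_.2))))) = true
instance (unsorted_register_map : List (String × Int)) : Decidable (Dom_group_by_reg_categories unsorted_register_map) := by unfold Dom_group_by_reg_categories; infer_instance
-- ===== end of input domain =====

-- B replaces A's single four-way branching loop with four independent filter passes, one per bucket (objective: simpler).

-- ===== PORT A =====
def is_local_var_nym (nym : String) : Bool := PySem.Str.startswith nym "_INTERNAL"

def is_tmp_var_nym (nym : String) : Bool := PySem.Str.startswith nym "t_"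

def is_var_nym (nym : String) : Bool := is_local_var_nym nym || is_tmp_var_nym nym

def is_param_nym (nym : String) : Bool := !is_var_nym nym

-- the `for nym in unsorted_register_map` loop iterates the dict's keys (first-occurrence order)
def group_by_reg_categories (unsorted_register_map : List (String × Int)) : List String × List String × List String × List String :=
  (PySem.Dict.ofList unsorted_register_map).keys.foldl
    (fun acc nym =>
      let (IRs, params, local_vars, tmp_vars) := acc
      if nym == "IR" then (IRs ++ [nym], params, local_vars, tmp_vars)
      else if is_param_nym nym then (IRs, params ++ [nym], local_vars, tmp_vars)
      else if is_local_var_nym nym then (IRs, params, local_vars ++ [nym], tmp_vars)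
      else if is_tmp_var_nym nym then (IRs, params, local_vars, tmp_vars ++ [nym])
      else (IRs, params, local_vars, tmp_vars))  -- `raise ValueError` branch: unreachable (is_param_nym = ¬(local ∨ tmp))
    ([], [], [], [])

-- ===== PORT B =====
def group_by_reg_categories_alt (unsorted_register_map : List (String × Int)) : List String × List String × List String × List String :=
  let nyms := (PySem.Dict.ofList unsorted_register_map).keys
  (nyms.filter (fun n => n == "IR"),
   nyms.filter (fun n => n != "IR" && is_param_nym n),
   nyms.filter (fun n => n != "IR" && is_local_var_nym n),
   nyms.filter (fun n => n != "IR" && is_tmp_var_nym n && !is_local_var_nym n))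

-- ===== PRECONDITION & SPEC =====
def Spec_group_by_reg_categories (unsorted_register_map : List (String × Int)) (out : List String × List String × List String × List String) : Prop := out = group_by_reg_categories_alt unsorted_register_map
instance (unsorted_register_map : List (String × Int)) (out : List String × List String × List String × List String) : Decidable (Spec_group_by_reg_categories unsorted_register_map out) := by unfold Spec_group_by_reg_categories; infer_instance

-- ===== CLAIM (what is proved, stated in full; the proofs are below) =====
def Claim_equal_group_by_reg_categories : Prop := ∀ (unsorted_register_map : List (String × Int)), Dom_group_by_reg_categories unsorted_register_map → Spec_group_by_reg_categories unsorted_register_map (group_by_reg_categories unsorted_register_map)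

-- ===== LEMMAS AND PROOFS =====

-- loop invariant: A's fold extends each accumulator bucket by the corresponding filter
theorem gbrc_foldl_filter (nyms : List String) (a b c d : List String) :
    nyms.foldl
      (fun acc nym =>
        let (IRs, params, local_vars, tmp_vars) := acc
        if nym == "IR" then (IRs ++ [nym], params, local_vars, tmp_vars)
        else if is_param_nym nym then (IRs, params ++ [nym], local_vars, tmp_vars)
        else if is_local_var_nym nym then (IRs, params, local_vars ++ [nym], tmp_vars)
        else if is_tmp_var_nym nym then (IRs, params, local_vars, tmp_vars ++ [nym])
        else (IRs, params, local_vars, tmp_vars))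
      (a, b, c, d)
    = (a ++ nyms.filter (fun n => n == "IR"),
       b ++ nyms.filter (fun n => n != "IR" && is_param_nym n),
       c ++ nyms.filter (fun n => n != "IR" && is_local_var_nym n),
       d ++ nyms.filter (fun n => n != "IR" && is_tmp_var_nym n && !is_local_var_nym n)) := by
  induction nyms generalizing a b c d with
  | nil => simp
  | cons n rest ih =>
    rw [List.foldl_cons]
    by_cases hIR : (n == "IR") = true
    · simp only [hIR, if_true]
      rw [ih]
      have hn : n = "IR" := by simpa using hIR
      simp [hn]
    · by_cases hp : is_param_nym n = true
      · obtain ⟨hl, ht⟩ : is_local_var_nym n = false ∧ is_tmp_var_nym n = false := by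
          simpa [is_param_nym, is_var_nym] using hp
        have hIR' : (n == "IR") = false := by simpa using hIR
        simp only [hIR', hp, Bool.false_eq_true, if_false, if_true]
        rw [ih]
        have hne : ¬ n = "IR" := by simpa using hIR
        simp [hne, hp, hl, ht]
      · have hnp : is_param_nym n = false := by simpa using hp
        have hIR' : (n == "IR") = false := by simpa using hIR
        by_cases hl : is_local_var_nym n = true
        · simp only [hIR', hnp, hl, Bool.false_eq_true, if_false, if_true]
          rw [ih]
          have hne : ¬ n = "IR" := by simpa using hIR
          simp [hne, hnp, hl]
        · have hl' : is_local_var_nym n = false := by simpa using hl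
          have ht : is_tmp_var_nym n = true := by
            simpa [is_param_nym, is_var_nym, hl'] using hnp
          simp only [hIR', hnp, hl', ht, Bool.false_eq_true, if_false, if_true]
          rw [ih]
          have hne : ¬ n = "IR" := by simpa using hIR
          simp [hne, hnp, hl', ht]

-- ===== VERDICT (by name: the statement is the Claim_ definition above) =====
theorem group_by_reg_categories_spec : Claim_equal_group_by_reg_categories := by
  intro m _
  show group_by_reg_categories m = group_by_reg_categories_alt m
  unfold group_by_reg_categories group_by_reg_categories_alt
  rw [gbrc_foldl_filter]
  simp
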